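-- pv_equiv track=rewrite | github.com/Spiti666/base_bot | config_defaults.py | build_backtest_batch_symbols
-- ===== SOURCE A (Python) =====
-- from typing import Iterable
--
-- def normalize_symbol_list(symbols: Iterable[object]) -> list[str]:
--     return list(
--         dict.fromkeys(
--             str(symbol).strip().upper()
--             for symbol in symbols
--             if str(symbol).strip()
--         )
--     )
--
-- def build_backtest_batch_symbols(
--     active_coins: Iterable[object],
--     backtest_only_coins: Iterable[object],
-- ) -> tuple[str, ...]:
--     normalized_active = normalize_symbol_list(active_coins)
--     normalized_backtest_only = [
--         symbol
--         for symbol in normalize_symbol_list(backtest_only_coins)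
--         if symbol not in set(normalized_active)
--     ]
--     return tuple(dict.fromkeys((*normalized_active, *normalized_backtest_only)))
-- ===== SOURCE B (Python) =====
-- def build_backtest_batch_symbols(active_coins, backtest_only_coins):
--     # Normalize once, then dedup by repeatedly taking the head and
--     # filtering all its later duplicates out of the remainder: no
--     # seen-set / dict membership structure at all.
--     pending = []
--     for symbol in [*active_coins, *backtest_only_coins]:
--         s = str(symbol).strip()
--         if s:
--             pending.append(s.upper())
--     result = []
--     while pending:
--         head = pending[0]
--         result.append(head)
--         pending = [x for x in pending[1:] if x != head]
--     return tuple(result)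
-- ===== Notes on version B (the rewrite author's own statement) =====
-- stated objective: alternative
-- what changed: Replaced A's staged normalize/dedup passes with seen-set membership (dict.fromkeys twice, a set rebuild, a final re-dedup) by a head-and-filter-remainder dedup: after one normalization pass, repeatedly emit the first pending symbol and filter its duplicates out of the remainder, with no seen-set or dict at all (quadratic in distinct symbols, not faster).
import Mathlib
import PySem

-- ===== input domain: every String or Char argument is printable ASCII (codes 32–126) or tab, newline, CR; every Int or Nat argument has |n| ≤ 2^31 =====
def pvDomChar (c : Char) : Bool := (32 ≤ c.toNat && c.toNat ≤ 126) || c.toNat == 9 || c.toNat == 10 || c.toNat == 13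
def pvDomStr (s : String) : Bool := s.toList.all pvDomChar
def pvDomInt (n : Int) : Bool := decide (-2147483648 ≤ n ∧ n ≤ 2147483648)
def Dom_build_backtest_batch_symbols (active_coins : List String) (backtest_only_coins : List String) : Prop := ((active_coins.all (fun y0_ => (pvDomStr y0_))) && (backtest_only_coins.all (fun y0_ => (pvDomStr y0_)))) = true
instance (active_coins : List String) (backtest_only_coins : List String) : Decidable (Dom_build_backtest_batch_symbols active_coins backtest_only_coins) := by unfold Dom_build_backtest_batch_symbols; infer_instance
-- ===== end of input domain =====

-- B replaces A's staged dict.fromkeys/set-membership dedup by a head-and-filter-remainder dedup (no seen set at all): an alternative decomposition, not claimed faster (it is quadratic in the number of distinct symbols).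

-- ===== PORT A =====
def normalize_symbol_list (symbols : List String) : List String :=
  PySem.List.dedup
    ((symbols.filter (fun s => PySem.Str.strip s != "")).map
      (fun s => PySem.Str.upper (PySem.Str.strip s)))

def build_backtest_batch_symbols (active_coins : List String) (backtest_only_coins : List String) : List String :=
  let normalized_active := normalize_symbol_list active_coins
  let normalized_backtest_only :=
    (normalize_symbol_list backtest_only_coins).filter
      (fun s => !(PySem.Set.contains (PySem.Set.ofList normalized_active) s))
  PySem.List.dedup (normalized_active ++ normalized_backtest_only)

-- ===== PORT B =====
-- the 'while pending:' loop of Source B: emit the head, filter its duplicates out of the rest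
def bbbsWhile (result : List String) (pending : List String) : List String :=
  match pending with
  | [] => result
  | head :: rest => bbbsWhile (result ++ [head]) (rest.filter (fun x => x != head))
termination_by pending.length
decreasing_by simpa using Nat.lt_succ_of_le (List.length_filter_le _ _)

def build_backtest_batch_symbols_alt (active_coins : List String) (backtest_only_coins : List String) : List String :=
  let pending :=
    (active_coins ++ backtest_only_coins).foldl
      (fun acc symbol =>
        let s := PySem.Str.strip symbol
        if s == "" then acc else acc ++ [PySem.Str.upper s]) []
  bbbsWhile [] pending

-- ===== PRECONDITION & SPEC =====
def Spec_build_backtest_batch_symbols (active_coins : List String) (backtest_only_coins : List String) (out : List String) : Prop := out = build_backtest_batch_symbols_alt active_coins backtest_only_coins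
instance (active_coins : List String) (backtest_only_coins : List String) (out : List String) : Decidable (Spec_build_backtest_batch_symbols active_coins backtest_only_coins out) := by unfold Spec_build_backtest_batch_symbols; infer_instance

-- ===== CLAIM (what is proved, stated in full; the proofs are below) =====
def Claim_equal_build_backtest_batch_symbols : Prop := ∀ (active_coins : List String) (backtest_only_coins : List String), Dom_build_backtest_batch_symbols active_coins backtest_only_coins → Spec_build_backtest_batch_symbols active_coins backtest_only_coins (build_backtest_batch_symbols active_coins backtest_only_coins)

-- ===== LEMMAS AND PROOFS =====

-- the normalized stream: strip, drop empties, upper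
def bbbsG (xs : List String) : List String :=
  (xs.filter (fun s => PySem.Str.strip s != "")).map (fun s => PySem.Str.upper (PySem.Str.strip s))

lemma bbbs_norm_loop (xs : List String) (acc : List String) :
    xs.foldl
      (fun acc symbol =>
        let s := PySem.Str.strip symbol
        if s == "" then acc else acc ++ [PySem.Str.upper s]) acc
      = acc ++ bbbsG xs := by
  induction xs generalizing acc with
  | nil => simp [bbbsG]
  | cons x xs ih =>
    rw [List.foldl_cons]
    by_cases hx : PySem.Str.strip x = ""
    · rw [show (let s := PySem.Str.strip x
            if s == "" then acc else acc ++ [PySem.Str.upper s]) = acc from by simp [hx], ih]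
      simp [bbbsG, hx]
    · rw [show (let s := PySem.Str.strip x
            if s == "" then acc else acc ++ [PySem.Str.upper s])
            = acc ++ [PySem.Str.upper (PySem.Str.strip x)] from by simp [hx], ih]
      simp [bbbsG, hx]

lemma bbbs_ofList_filter (p : String → Bool) (t : List String) :
    (PySem.Set.ofList t).filter p = PySem.Set.ofList (t.filter p) := by
  induction t with
  | nil => simp [PySem.Set.ofList_nil]
  | cons y t ih =>
    rw [PySem.Set.ofList_cons]
    by_cases hy : p y = true
    · rw [List.filter_cons_of_pos hy, show (y :: t).filter p = y :: t.filter p from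
        List.filter_cons_of_pos hy, PySem.Set.ofList_cons, ← ih]
      show _ :: ((PySem.Set.ofList t).filter (fun z => !z == y)).filter p
          = _ :: ((PySem.Set.ofList t).filter p).filter (fun z => !z == y)
      rw [List.filter_filter, List.filter_filter]
      congr 1
      apply List.filter_congr
      intro a _
      exact Bool.and_comm _ _
    · rw [List.filter_cons_of_neg hy, show (y :: t).filter p = t.filter p from
        List.filter_cons_of_neg hy]
      show ((PySem.Set.ofList t).filter (fun z => !z == y)).filter p = _
      rw [List.filter_filter, ← ih]
      apply List.filter_congr
      intro a ha
      by_cases hay : a = y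
      · subst hay; simp [hy]
      · simp [hay]

lemma bbbs_while_eq_aux (n : Nat) : ∀ (l : List String), l.length ≤ n →
    ∀ (res : List String), bbbsWhile res l = res ++ PySem.Set.ofList l := by
  induction n with
  | zero =>
    intro l hl res
    have hnil : l = [] := List.eq_nil_of_length_eq_zero (Nat.le_zero.mp hl)
    subst hnil
    simp [bbbsWhile, PySem.Set.ofList_nil]
  | succ n ih =>
    intro l hl res
    cases l with
    | nil => simp [bbbsWhile, PySem.Set.ofList_nil]
    | cons head rest =>
      rw [bbbsWhile,
          ih _ (le_trans (List.length_filter_le _ _) (Nat.lt_succ_iff.mp (by simpa using hl))),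
          PySem.Set.ofList_cons]
      have hf : rest.filter (fun x => x != head) = rest.filter (fun x => !x == head) := by
        simp [bne]
      rw [hf, ← bbbs_ofList_filter]
      simp [PySem.Set.discard]

lemma bbbs_while_eq (l : List String) (res : List String) :
    bbbsWhile res l = res ++ PySem.Set.ofList l :=
  bbbs_while_eq_aux l.length l le_rfl res

-- ===== VERDICT (by name: the statement is the Claim_ definition above) =====
theorem build_backtest_batch_symbols_spec : Claim_equal_build_backtest_batch_symbols := by
  intro a b _
  show build_backtest_batch_symbols a b = build_backtest_batch_symbols_alt a b
  have hna : normalize_symbol_list a = PySem.Set.ofList (bbbsG a) :=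
    PySem.List.dedup_eq_ofList _
  have hnb : normalize_symbol_list b = PySem.Set.ofList (bbbsG b) :=
    PySem.List.dedup_eq_ofList _
  have hB : build_backtest_batch_symbols_alt a b = PySem.Set.ofList (bbbsG (a ++ b)) := by
    show bbbsWhile []
        ((a ++ b).foldl
          (fun acc symbol =>
            let s := PySem.Str.strip symbol
            if s == "" then acc else acc ++ [PySem.Str.upper s]) []) = _
    rw [bbbs_norm_loop, List.nil_append, bbbs_while_eq, List.nil_append]
  have hgab : bbbsG (a ++ b) = bbbsG a ++ bbbsG b := by
    simp [bbbsG, List.filter_append]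
  have hA : build_backtest_batch_symbols a b = PySem.Set.ofList (bbbsG (a ++ b)) := by
    show PySem.List.dedup
        (normalize_symbol_list a
          ++ (normalize_symbol_list b).filter
               (fun s => !(PySem.Set.contains
                   (PySem.Set.ofList (normalize_symbol_list a)) s))) = _
    rw [PySem.List.dedup_eq_ofList, hna, hnb,
        PySem.Set.ofList_eq_self_of_nodup _ (PySem.Set.nodup_ofList _),
        ← PySem.Set.update_eq_append_filter,
        ← PySem.Set.ofList_append, ← hgab, PySem.Set.ofList_ofList]
  rw [hA, hB]
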